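-- pv_equiv track=rewrite | github.com/Santiagolainen/ejercicios-AED | Ficha12E1.py | pal_3_letras
-- ===== SOURCE A (Python) =====
-- def pal_3_letras(oracion):
--     palabra = ''
--     cont_pal_3 = 0
--     i = 0
--     while oracion[i] != '.':
--         if oracion[i] != ' ':
--             palabra += oracion[i]
--         else:
--             if len(palabra) <= 3 and len(palabra) > 0:
--                 cont_pal_3 += 1
--             palabra = ''
--         i += 1
--     if len(palabra) <= 3 and len(palabra) > 0:
--         cont_pal_3 += 1
--     return cont_pal_3
-- ===== SOURCE B (Python) =====
-- def pal_3_letras(oracion):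
--     # locate the first '.' with an index scan (IndexError if absent, like A),
--     # then split the prefix on single spaces and count the short words
--     i = 0
--     while oracion[i] != '.':
--         i += 1
--     return sum(1 for p in oracion[:i].split(' ') if 0 < len(p) <= 3)
-- ===== Notes on version B (the rewrite author's own statement) =====
-- stated objective: simpler
-- what changed: A fuses period-detection, word-building and counting in one char loop with a word buffer; B first locates the '.' by an index scan, then slices the prefix, splits it on ' ' and counts the parts of length 1..3.
import Mathlib
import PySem

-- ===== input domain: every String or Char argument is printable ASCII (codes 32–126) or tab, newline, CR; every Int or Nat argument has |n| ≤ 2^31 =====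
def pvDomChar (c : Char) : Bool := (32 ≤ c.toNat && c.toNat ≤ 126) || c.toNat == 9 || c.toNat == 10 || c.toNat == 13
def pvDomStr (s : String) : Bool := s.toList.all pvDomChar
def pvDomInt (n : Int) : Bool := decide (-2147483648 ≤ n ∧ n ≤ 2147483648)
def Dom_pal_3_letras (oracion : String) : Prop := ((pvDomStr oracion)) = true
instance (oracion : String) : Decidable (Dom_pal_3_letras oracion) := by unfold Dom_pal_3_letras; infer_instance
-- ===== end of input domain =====

-- B replaces A's fused scan-build-count loop by locate-the-period, slice, split on ' ', count (objective: simpler).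

-- ===== PORT A =====
-- A's while loop: builds `palabra`, counts it on ' ', stops at '.'; the [] case is
-- Python's IndexError (excluded by Pre_), given the same final-check value here.
def palAuxA (l : List Char) (palabra : List Char) (cont : Int) : Int :=
  match l with
  | [] => if palabra.length ≤ 3 ∧ palabra.length > 0 then cont + 1 else cont
  | c :: rest =>
    if c = '.' then (if palabra.length ≤ 3 ∧ palabra.length > 0 then cont + 1 else cont)
    else if c ≠ ' ' then palAuxA rest (palabra ++ [c]) cont
    else palAuxA rest [] (if palabra.length ≤ 3 ∧ palabra.length > 0 then cont + 1 else cont)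

def pal_3_letras (oracion : String) : Int := palAuxA oracion.toList [] 0

-- ===== PORT B =====
-- B's `i = 0; while oracion[i] != '.': i += 1` (the [] case is the IndexError, excluded by Pre_)
def dotIdx : List Char → Nat
  | [] => 0
  | c :: rest => if c = '.' then 0 else dotIdx rest + 1

-- B: oracion[:i].split(' '), then sum of 1 over the parts p with 0 < len(p) <= 3
def pal_3_letras_alt (oracion : String) : Int :=
  (PySem.Chars.splitOn (PySem.List.slice oracion.toList none (some ((dotIdx oracion.toList : Nat) : Int))) [' ']).foldl
    (fun acc p => if 0 < PySem.Chars.len p ∧ PySem.Chars.len p ≤ 3 then acc + 1 else acc) 0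

-- ===== PRECONDITION & SPEC =====
-- Pre_ excludes exactly the strings without a '.', on which both Pythons raise IndexError.
def Pre_pal_3_letras (oracion : String) : Prop := '.' ∈ oracion.toList
instance (oracion : String) : Decidable (Pre_pal_3_letras oracion) := by unfold Pre_pal_3_letras; infer_instance
def pvWitness_pal_3_letras : String := "el sol es rojo."

def Spec_pal_3_letras (oracion : String) (out : Int) : Prop := out = pal_3_letras_alt oracion
instance (oracion : String) (out : Int) : Decidable (Spec_pal_3_letras oracion out) := by unfold Spec_pal_3_letras; infer_instance

-- ===== CLAIM (what is proved, stated in full; the proofs are below) =====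
def Claim_equal_pal_3_letras : Prop := ∀ (oracion : String), Dom_pal_3_letras oracion → Pre_pal_3_letras oracion → Spec_pal_3_letras oracion (pal_3_letras oracion)

-- ===== LEMMAS AND PROOFS =====

-- the natural cons-recursion computed by splitOn · [' ']
def mySplit : List Char → List Char → List (List Char)
  | [], cur => [cur.reverse]
  | c :: rest, cur => if c = ' ' then cur.reverse :: mySplit rest [] else mySplit rest (c :: cur)

-- the count B's fold computes, as a structural recursion
def countF : List (List Char) → Int
  | [] => 0
  | p :: ps => (if 0 < p.length ∧ p.length ≤ 3 then 1 else 0) + countF ps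

theorem splitOn_go_space (fuel : Nat) (l cur : List Char) (acc : List (List Char))
    (h : l.length ≤ fuel) :
    PySem.Chars.splitOn.go [' '] fuel l cur acc = acc.reverse ++ mySplit l cur := by
  induction fuel generalizing l cur acc with
  | zero =>
    have : l = [] := by cases l <;> simp_all
    subst this
    simp [PySem.Chars.splitOn.go, mySplit]
  | succ n ih =>
    cases l with
    | nil => simp [PySem.Chars.splitOn.go, mySplit]
    | cons c rest =>
      by_cases hc : c = ' '
      · subst hc
        rw [show PySem.Chars.splitOn.go [' '] (n + 1) (' ' :: rest) cur acc
              = PySem.Chars.splitOn.go [' '] n rest [] (cur.reverse :: acc) by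
            simp [PySem.Chars.splitOn.go, List.isPrefixOf]]
        rw [ih _ _ _ (by simp at h; omega)]
        simp [mySplit]
      · rw [show PySem.Chars.splitOn.go [' '] (n + 1) (c :: rest) cur acc
              = PySem.Chars.splitOn.go [' '] n rest (c :: cur) acc by
            simp [PySem.Chars.splitOn.go, List.isPrefixOf,
              beq_eq_false_iff_ne.mpr (fun h => hc h.symm)]]
        rw [ih _ _ _ (by simp at h; omega)]
        simp [mySplit, hc]

theorem splitOn_space (l : List Char) :
    PySem.Chars.splitOn l [' '] = mySplit l [] := by
  unfold PySem.Chars.splitOn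
  rw [splitOn_go_space _ _ _ _ (by omega)]
  simp

theorem foldl_countF (ps : List (List Char)) (acc : Int) :
    ps.foldl (fun acc p => if 0 < PySem.Chars.len p ∧ PySem.Chars.len p ≤ 3 then acc + 1 else acc) acc
      = acc + countF ps := by
  induction ps generalizing acc with
  | nil => simp [countF]
  | cons p ps ih =>
    simp only [List.foldl]
    rw [ih, countF]
    simp only [PySem.Chars.len_eq]
    split_ifs <;> omega

theorem palAuxA_eq (l pal : List Char) (cont : Int) :
    palAuxA l pal cont = cont + countF (mySplit (l.take (dotIdx l)) pal.reverse) := by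
  induction l generalizing pal cont with
  | nil =>
    rw [palAuxA]
    simp only [dotIdx, List.take_nil, mySplit, List.reverse_reverse, countF]
    split_ifs <;> omega
  | cons c rest ih =>
    by_cases hd : c = '.'
    · subst hd
      rw [palAuxA, if_pos rfl, show dotIdx ('.' :: rest) = 0 from by simp [dotIdx]]
      simp only [List.take_zero, mySplit, List.reverse_reverse, countF]
      split_ifs <;> omega
    · by_cases hs : c = ' '
      · subst hs
        rw [palAuxA, if_neg (by decide : ¬(' ' = '.')), if_neg (by simp),
          show dotIdx (' ' :: rest) = dotIdx rest + 1 from by simp [dotIdx], ih,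
          List.take_succ_cons]
        simp only [mySplit, reduceIte, List.reverse_reverse, List.reverse_nil]
        rw [countF]
        split_ifs <;> omega
      · rw [palAuxA, if_neg hd, if_pos (by simpa using hs),
          show dotIdx (c :: rest) = dotIdx rest + 1 from by simp [dotIdx, hd], ih,
          List.take_succ_cons]
        simp only [mySplit, if_neg hs]
        simp

-- ===== VERDICT (by name: the statement is the Claim_ definition above) =====
theorem pal_3_letras_spec : Claim_equal_pal_3_letras := by
  intro oracion _ _
  show pal_3_letras oracion = pal_3_letras_alt oracion
  unfold pal_3_letras pal_3_letras_alt
  rw [PySem.List.slice_to_natCast, splitOn_space, foldl_countF, palAuxA_eq]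
  simp
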